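-- pv_equiv track=rewrite | github.com/vkulkarni/antfarm | antfarm/core/autoscaler.py | count_scope_groups
-- ===== SOURCE A (Python) =====
-- def count_scope_groups(tasks: list[dict]) -> int:
--     """Count non-overlapping scope groups (union-find by touches)."""
--     if not tasks:
--         return 0
--     groups: list[set[str]] = []
--     for t in tasks:
--         touches = set(t.get("touches", []))
--         if not touches:
--             groups.append(set())
--             continue
--         hit = None
--         for g in groups:
--             if g & touches:
--                 g.update(touches)
--                 hit = g
--                 break
--         if hit is None:
--             groups.append(touches)
--     return len(groups)
-- ===== SOURCE B (Python) =====
-- def count_scope_groups(tasks: list[dict]) -> int: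
--     """Count non-overlapping scope groups (union-find by touches)."""
--     count = 0
--     first = {}  # element -> smallest index of a group containing it
--     for t in tasks:
--         touches = t.get("touches", [])
--         if not touches:
--             count += 1
--             continue
--         hits = [first[e] for e in touches if e in first]
--         if hits:
--             i = min(hits)
--             for e in touches:
--                 j = first.get(e, i)
--                 first[e] = i if i < j else j
--         else:
--             for e in touches:
--                 first[e] = count
--             count += 1
--     return count
-- ===== Notes on version B (the rewrite author's own statement) =====
-- stated objective: alternative
-- what changed: A scans the whole list of accumulated groups (intersecting each with the task's touch set) for every task; B keeps no group sets at all - only a dictionary mapping each touch element to the smallest index of a group containing it - so each task just looks up and updates its own touch elements (the first overlapping group is the minimum of those indices).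
import Mathlib
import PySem

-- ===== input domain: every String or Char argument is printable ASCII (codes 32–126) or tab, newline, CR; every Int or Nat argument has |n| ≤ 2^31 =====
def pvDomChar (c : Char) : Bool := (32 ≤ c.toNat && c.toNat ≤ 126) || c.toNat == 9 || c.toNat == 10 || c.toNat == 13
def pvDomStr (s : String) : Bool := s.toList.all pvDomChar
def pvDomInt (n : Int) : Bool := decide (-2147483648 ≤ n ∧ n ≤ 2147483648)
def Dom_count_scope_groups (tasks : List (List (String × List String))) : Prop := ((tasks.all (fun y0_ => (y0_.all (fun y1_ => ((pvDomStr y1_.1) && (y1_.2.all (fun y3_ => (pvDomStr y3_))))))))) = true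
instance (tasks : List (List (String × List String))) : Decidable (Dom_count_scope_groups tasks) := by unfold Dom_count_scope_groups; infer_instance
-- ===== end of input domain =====

-- B replaces A's linear scan over all accumulated groups per task by an
-- element→first-group-index dictionary, so each task only looks up and updates
-- its own touch elements (objective: alternative algorithm).

-- ===== PORT A =====
-- 'for g in groups: if g & touches: g.update(touches); hit = g; break' — returns the
-- updated groups list when some group overlaps (first one updated in place), none otherwise.
def csgScan (touches : PySem.Set String) : List (PySem.Set String) → Option (List (PySem.Set String))
  | [] => none
  | g :: gs =>
      if PySem.Set.inter g touches ≠ [] then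
        some (PySem.Set.update g touches :: gs)
      else
        match csgScan touches gs with
        | some gs' => some (g :: gs')
        | none => none

def csgStep (groups : List (PySem.Set String)) (t : List (String × List String)) : List (PySem.Set String) :=
  let touches : PySem.Set String := PySem.Set.ofList (((List.lookup "touches" t).getD []))
  if touches = [] then groups ++ [PySem.Set.empty]
  else
    match csgScan touches groups with
    | some groups' => groups'
    | none => groups ++ [touches]

def count_scope_groups (tasks : List (List (String × List String))) : Int :=
  if tasks = [] then 0
  else ((tasks.foldl csgStep []).length : Int)

-- ===== PORT B =====
def csgAltStep (st : Int × PySem.Dict String Int) (t : List (String × List String)) : Int × PySem.Dict String Int :=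
  let touches := ((List.lookup "touches" t).getD ([] : List String))
  if touches = [] then (st.1 + 1, st.2)
  else
    let hits := touches.filterMap (fun e => PySem.Dict.get? st.2 e)
    match PySem.List.min? hits (fun x => x) with
    | some i =>
        (st.1, touches.foldl (fun m e =>
            let j := PySem.Dict.getD m e i
            PySem.Dict.insert m e (if i < j then i else j)) st.2)
    | none =>
        (st.1 + 1, touches.foldl (fun m e => PySem.Dict.insert m e st.1) st.2)

def count_scope_groups_alt (tasks : List (List (String × List String))) : Int :=
  (tasks.foldl csgAltStep (0, PySem.Dict.empty)).1

-- ===== PRECONDITION & SPEC =====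
def Spec_count_scope_groups (tasks : List (List (String × List String))) (out : Int) : Prop := out = count_scope_groups_alt tasks
instance (tasks : List (List (String × List String))) (out : Int) : Decidable (Spec_count_scope_groups tasks out) := by unfold Spec_count_scope_groups; infer_instance

-- ===== CLAIM (what is proved, stated in full; the proofs are below) =====
def Claim_equal_count_scope_groups : Prop := ∀ (tasks : List (List (String × List String))), Dom_count_scope_groups tasks → Spec_count_scope_groups tasks (count_scope_groups tasks)

-- ===== LEMMAS AND PROOFS =====

-- index of the first group containing e
def fIdx (e : String) : List (PySem.Set String) → Option Nat
  | [] => none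
  | g :: gs => if e ∈ g then some 0 else (fIdx e gs).map (· + 1)

-- index of the first group overlapping set(raw) (the same condition csgScan tests)
def oIdx (raw : List String) : List (PySem.Set String) → Option Nat
  | [] => none
  | g :: gs =>
      if PySem.Set.inter g (PySem.Set.ofList raw) ≠ [] then some 0
      else (oIdx raw gs).map (· + 1)

-- the dictionary invariant tying B's state to A's groups
def CsgInv (m : PySem.Dict String Int) (groups : List (PySem.Set String)) : Prop :=
  ∀ e, PySem.Dict.get? m e = (fIdx e groups).map (fun n => (n : Int))

lemma inter_ne_nil_iff (g : PySem.Set String) (raw : List String) :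
    PySem.Set.inter g (PySem.Set.ofList raw) ≠ [] ↔ ∃ e ∈ raw, e ∈ g := by
  constructor
  · intro h
    obtain ⟨y, hy⟩ := List.exists_mem_of_ne_nil _ h
    rw [PySem.Set.mem_inter _ _ _] at hy
    exact ⟨y, (PySem.Set.mem_ofList _ _).1 hy.2, hy.1⟩
  · rintro ⟨e, he, heg⟩ hnil
    have hme : e ∈ PySem.Set.inter g (PySem.Set.ofList raw) :=
      (PySem.Set.mem_inter _ _ _).2 ⟨heg, (PySem.Set.mem_ofList _ _).2 he⟩
    rw [hnil] at hme
    exact absurd hme (List.not_mem_nil)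

lemma ofList_ne_nil (raw : List String) (h : raw ≠ []) : PySem.Set.ofList raw ≠ [] := by
  obtain ⟨y, hy⟩ := List.exists_mem_of_ne_nil _ h
  intro hnil
  have := (PySem.Set.mem_ofList _ _).2 hy
  rw [hnil] at this
  exact absurd this (List.not_mem_nil)

lemma fIdx_append (e : String) (groups : List (PySem.Set String)) (s : PySem.Set String) :
    fIdx e (groups ++ [s]) =
      match fIdx e groups with
      | some i => some i
      | none => if e ∈ s then some groups.length else none := by
  induction groups with
  | nil => by_cases h : e ∈ s <;> simp [fIdx, h]
  | cons g gs ih =>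
      by_cases h : e ∈ g
      · simp [fIdx, h]
      · simp only [List.cons_append, fIdx, if_neg h, ih]
        cases hf : fIdx e gs with
        | some i => simp
        | none => by_cases hs : e ∈ s <;> simp [hs]

lemma oIdx_none_iff (raw : List String) (groups : List (PySem.Set String)) :
    oIdx raw groups = none ↔ ∀ e ∈ raw, fIdx e groups = none := by
  induction groups with
  | nil => simp [oIdx, fIdx]
  | cons g gs ih =>
      by_cases h : PySem.Set.inter g (PySem.Set.ofList raw) ≠ []
      · simp only [oIdx, if_pos h]
        rw [inter_ne_nil_iff] at h
        obtain ⟨e, he, heg⟩ := h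
        constructor
        · intro h0; exact absurd h0 (by simp)
        · intro hall
          have := hall e he
          simp [fIdx, heg] at this
      · simp only [oIdx, if_neg h, Option.map_eq_none_iff, ih]
        have hng : ∀ e ∈ raw, e ∉ g := by
          intro e he hg
          exact h ((inter_ne_nil_iff g raw).2 ⟨e, he, hg⟩)
        constructor
        · intro hall e he
          simp [fIdx, hng e he, hall e he]
        · intro hall e he
          have := hall e he
          simp [fIdx, hng e he] at this
          simp [this]

lemma oIdx_le_fIdx (raw : List String) (groups : List (PySem.Set String)) (i0 : Nat)
    (h : oIdx raw groups = some i0) :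
    ∀ e ∈ raw, ∀ n, fIdx e groups = some n → i0 ≤ n := by
  induction groups generalizing i0 with
  | nil => intro e he n hn; simp [fIdx] at hn
  | cons g gs ih =>
      by_cases hov : PySem.Set.inter g (PySem.Set.ofList raw) ≠ []
      · simp only [oIdx, if_pos hov, Option.some.injEq] at h
        intro e he n hn
        omega
      · simp only [oIdx, if_neg hov] at h
        cases ho : oIdx raw gs with
        | none => rw [ho] at h; simp at h
        | some i1 =>
            rw [ho] at h; simp at h
            intro e he n hn
            have hng : e ∉ g := by
              intro hg
              exact hov ((inter_ne_nil_iff g raw).2 ⟨e, he, hg⟩)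
            simp only [fIdx, if_neg hng] at hn
            cases hf : fIdx e gs with
            | none => rw [hf] at hn; simp at hn
            | some n1 =>
                rw [hf] at hn; simp at hn
                have := ih i1 ho e he n1 hf
                omega

lemma oIdx_witness (raw : List String) (groups : List (PySem.Set String)) (i0 : Nat)
    (h : oIdx raw groups = some i0) :
    ∃ e ∈ raw, fIdx e groups = some i0 := by
  induction groups generalizing i0 with
  | nil => simp [oIdx] at h
  | cons g gs ih =>
      by_cases hov : PySem.Set.inter g (PySem.Set.ofList raw) ≠ []
      · simp only [oIdx, if_pos hov, Option.some.injEq] at h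
        obtain ⟨e, he, heg⟩ := (inter_ne_nil_iff g raw).1 hov
        exact ⟨e, he, by simp [fIdx, heg, ← h]⟩
      · simp only [oIdx, if_neg hov] at h
        cases ho : oIdx raw gs with
        | none => rw [ho] at h; simp at h
        | some i1 =>
            rw [ho] at h; simp at h
            obtain ⟨e, he, hf⟩ := ih i1 ho
            have hng : e ∉ g := by
              intro hg
              exact hov ((inter_ne_nil_iff g raw).2 ⟨e, he, hg⟩)
            exact ⟨e, he, by simp [fIdx, hng, hf, ← h]⟩

lemma scan_none (raw : List String) (groups : List (PySem.Set String))
    (h : oIdx raw groups = none) :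
    csgScan (PySem.Set.ofList raw) groups = none := by
  induction groups with
  | nil => simp [csgScan]
  | cons g gs ih =>
      by_cases hov : PySem.Set.inter g (PySem.Set.ofList raw) ≠ []
      · simp only [oIdx, if_pos hov] at h; simp at h
      · simp only [oIdx, if_neg hov, Option.map_eq_none_iff] at h
        simp only [csgScan, if_neg hov, ih h]

lemma scan_some (raw : List String) (groups : List (PySem.Set String)) (i0 : Nat)
    (h : oIdx raw groups = some i0) :
    ∃ gs', csgScan (PySem.Set.ofList raw) groups = some gs' ∧
      gs'.length = groups.length ∧
      (∀ e ∈ raw, fIdx e gs' = some i0) ∧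
      (∀ e, e ∉ raw → fIdx e gs' = fIdx e groups) := by
  induction groups generalizing i0 with
  | nil => simp [oIdx] at h
  | cons g gs ih =>
      by_cases hov : PySem.Set.inter g (PySem.Set.ofList raw) ≠ []
      · simp only [oIdx, if_pos hov, Option.some.injEq] at h
        refine ⟨PySem.Set.update g (PySem.Set.ofList raw) :: gs, ?_, by simp, ?_, ?_⟩
        · simp only [csgScan, if_pos hov]
        · intro e he
          have : e ∈ PySem.Set.update g (PySem.Set.ofList raw) :=
            (PySem.Set.mem_update _ _ _).2 (Or.inr ((PySem.Set.mem_ofList _ _).2 he))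
          simp [fIdx, this, ← h]
        · intro e he
          have hmu : e ∈ PySem.Set.update g (PySem.Set.ofList raw) ↔ e ∈ g := by
            simp [PySem.Set.mem_update, PySem.Set.mem_ofList, he]
          by_cases hg : e ∈ g
          · simp [fIdx, hg, hmu.2 hg]
          · simp [fIdx, hg, hmu]
      · simp only [oIdx, if_neg hov] at h
        cases ho : oIdx raw gs with
        | none => rw [ho] at h; simp at h
        | some i1 =>
            rw [ho] at h; simp at h
            obtain ⟨gs'', hscan, hlen, hin, hout⟩ := ih i1 ho
            refine ⟨g :: gs'', ?_, by simp [hlen], ?_, ?_⟩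
            · simp only [csgScan, if_neg hov, hscan]
            · intro e he
              have hng : e ∉ g := by
                intro hg
                exact hov ((inter_ne_nil_iff g raw).2 ⟨e, he, hg⟩)
              simp [fIdx, hng, hin e he, ← h]
            · intro e he
              by_cases hg : e ∈ g
              · simp [fIdx, hg]
              · simp [fIdx, hg, hout e he]

lemma foldl_insert_const (raw : List String) (m : PySem.Dict String Int) (c : Int) :
    ∀ e, PySem.Dict.get? (raw.foldl (fun m e => PySem.Dict.insert m e c) m) e =
      if e ∈ raw then some c else PySem.Dict.get? m e := by
  induction raw generalizing m with
  | nil => intro e; simp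
  | cons a raws ih =>
      intro e
      simp only [List.foldl_cons, ih (PySem.Dict.insert m a c) e, PySem.Dict.get?_insert]
      by_cases h1 : e ∈ raws
      · simp [h1]
      · by_cases h2 : e = a <;> simp [h1, h2]

lemma foldl_insert_min (raw : List String) (m : PySem.Dict String Int) (i : Int)
    (h : ∀ e ∈ raw, ∀ j, PySem.Dict.get? m e = some j → i ≤ j) :
    ∀ e, PySem.Dict.get? (raw.foldl (fun m e =>
        let j := PySem.Dict.getD m e i
        PySem.Dict.insert m e (if i < j then i else j)) m) e =
      if e ∈ raw then some i else PySem.Dict.get? m e := by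
  induction raw generalizing m with
  | nil => intro e; simp
  | cons a raws ih =>
      intro e
      have hval : (if i < PySem.Dict.getD m a i then i else PySem.Dict.getD m a i) = i := by
        cases hg : PySem.Dict.get? m a with
        | none => rw [PySem.Dict.getD_of_get?_eq_none m i hg]; simp
        | some j =>
            have hij : i ≤ j := h a (by simp) j hg
            simp only [PySem.Dict.getD_of_get?_eq_some m i hg]
            split_ifs <;> omega
      have hstep : ∀ e' ∈ raws, ∀ j, PySem.Dict.get? (PySem.Dict.insert m a i) e' = some j → i ≤ j := by
        intro e' he' j hj
        rw [PySem.Dict.get?_insert] at hj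
        by_cases h2 : e' = a
        · rw [if_pos h2] at hj
          injection hj with hj'
          omega
        · rw [if_neg h2] at hj; exact h e' (by simp [he']) j hj
      simp only [List.foldl_cons, hval, ih (PySem.Dict.insert m a i) hstep e, PySem.Dict.get?_insert]
      by_cases h1 : e ∈ raws
      · simp [h1]
      · by_cases h2 : e = a <;> simp [h1, h2]

lemma step_sim (t : List (String × List String)) (groups : List (PySem.Set String))
    (count : Int) (m : PySem.Dict String Int)
    (hc : count = (groups.length : Int)) (hinv : CsgInv m groups) :
    ∃ groups' count' m', csgStep groups t = groups' ∧ csgAltStep (count, m) t = (count', m') ∧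
      count' = (groups'.length : Int) ∧ CsgInv m' groups' := by
  unfold csgStep csgAltStep
  simp only []
  by_cases hraw : (List.lookup "touches" t).getD ([] : List String) = []
  · rw [hraw]
    simp only [PySem.Set.ofList_nil, reduceIte]
    refine ⟨_, _, _, rfl, rfl, by simp [hc], ?_⟩
    intro e
    rw [hinv e, fIdx_append]
    cases hf : fIdx e groups with
    | some i => simp
    | none => simp [PySem.Set.empty]
  · generalize hrd : (List.lookup "touches" t).getD ([] : List String) = raw at hraw ⊢
    rw [if_neg (ofList_ne_nil raw hraw), if_neg hraw]
    cases hmin : PySem.List.min? (raw.filterMap fun e => PySem.Dict.get? m e) (fun x => x) with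
    | none =>
        have hhits : raw.filterMap (fun e => PySem.Dict.get? m e) = [] := by
          have := PySem.List.min?_eq_none_iff (xs := raw.filterMap fun e => PySem.Dict.get? m e)
            (key := fun x => x)
          exact this.1 hmin
        have hnof : ∀ e ∈ raw, fIdx e groups = none := by
          intro e he
          cases hf : fIdx e groups with
          | none => rfl
          | some n =>
              have hmem : ((n : Int)) ∈ raw.filterMap (fun e => PySem.Dict.get? m e) :=
                List.mem_filterMap.2 ⟨e, he, by rw [hinv e, hf]; rfl⟩
              rw [hhits] at hmem
              exact absurd hmem (List.not_mem_nil)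
        rw [scan_none raw groups ((oIdx_none_iff raw groups).2 hnof)]
        refine ⟨_, _, _, rfl, rfl, by simp [hc], ?_⟩
        intro e
        rw [foldl_insert_const raw m count e, fIdx_append]
        by_cases he : e ∈ raw
        · rw [if_pos he, hnof e he]
          simp [PySem.Set.mem_ofList, he, hc]
        · rw [if_neg he, hinv e]
          cases hf : fIdx e groups with
          | some i => simp
          | none => simp [PySem.Set.mem_ofList, he]
    | some i =>
        have himem : i ∈ raw.filterMap (fun e => PySem.Dict.get? m e) := PySem.List.min?_mem hmin
        have himin : ∀ y ∈ raw.filterMap (fun e => PySem.Dict.get? m e), i ≤ y :=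
          PySem.List.min?_isMin hmin
        obtain ⟨e0, he0, hge0⟩ := List.mem_filterMap.1 himem
        rw [hinv e0] at hge0
        cases hf0 : fIdx e0 groups with
        | none => rw [hf0] at hge0; simp at hge0
        | some n0 =>
            rw [hf0] at hge0
            simp at hge0
            cases ho : oIdx raw groups with
            | none =>
                have := (oIdx_none_iff raw groups).1 ho e0 he0
                rw [hf0] at this
                exact absurd this (by simp)
            | some i0 =>
                obtain ⟨e1, he1, hf1⟩ := oIdx_witness raw groups i0 ho
                have h1 : ((i0 : Int)) ∈ raw.filterMap (fun e => PySem.Dict.get? m e) :=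
                  List.mem_filterMap.2 ⟨e1, he1, by rw [hinv e1, hf1]; rfl⟩
                have hle1 : i ≤ (i0 : Int) := himin _ h1
                have hle2 : i0 ≤ n0 := oIdx_le_fIdx raw groups i0 ho e0 he0 n0 hf0
                have hii : ((i0 : Int)) = i := by omega
                obtain ⟨gs', hscan, hlen, hinr, houtr⟩ := scan_some raw groups i0 ho
                rw [hscan]
                have hh : ∀ e ∈ raw, ∀ j, PySem.Dict.get? m e = some j → i ≤ j := by
                  intro e he j hj
                  rw [hinv e] at hj
                  cases hf : fIdx e groups with
                  | none => rw [hf] at hj; simp at hj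
                  | some n =>
                      rw [hf] at hj
                      simp at hj
                      have := oIdx_le_fIdx raw groups i0 ho e he n hf
                      omega
                refine ⟨_, _, _, rfl, rfl, by rw [hlen]; exact hc, ?_⟩
                intro e
                rw [foldl_insert_min raw m i hh e]
                by_cases he : e ∈ raw
                · rw [if_pos he, hinr e he]
                  simp [hii]
                · rw [if_neg he, houtr e he, hinv e]

lemma main_loop : ∀ (tasks : List (List (String × List String)))
    (groups : List (PySem.Set String)) (count : Int) (m : PySem.Dict String Int),
    count = (groups.length : Int) → CsgInv m groups →
    ((tasks.foldl csgStep groups).length : Int) = (tasks.foldl csgAltStep (count, m)).1 := by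
  intro tasks
  induction tasks with
  | nil => intro groups count m hc _; simp [hc]
  | cons t ts ih =>
      intro groups count m hc hinv
      obtain ⟨groups', count', m', hA, hB, hc', hinv'⟩ := step_sim t groups count m hc hinv
      simp only [List.foldl_cons, hA, hB]
      exact ih groups' count' m' hc' hinv'

-- ===== VERDICT (by name: the statement is the Claim_ definition above) =====
theorem count_scope_groups_spec : Claim_equal_count_scope_groups := by
  intro tasks _
  unfold Spec_count_scope_groups count_scope_groups count_scope_groups_alt
  rcases tasks with _ | ⟨t, ts⟩
  · simp
  · simp only [if_neg (by simp : ¬(t :: ts = []))]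
    exact main_loop (t :: ts) [] 0 PySem.Dict.empty (by simp) (by intro e; simp [fIdx, PySem.Dict.get?_empty])
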